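-- pv_equiv track=rewrite | github.com/coreyamano/python_practice | basic_string_algo_ladder.py | find_first_dupe
-- ===== SOURCE A (Python) =====
-- def find_first_dupe(input_sent):
--     output_letter = ""
--     let1 = 0
--     let2 = 1
--     while let2 < len(input_sent):
--         if input_sent[let1] == input_sent[let2]:
--             output_letter = input_sent[let1]
--             return output_letter
--         let1 += 1
--         let2 += 1
-- ===== SOURCE B (Python) =====
-- def find_first_dupe(input_sent):
--     n = len(input_sent)
--     i = 0
--     while i < n:
--         j = i
--         while j < n and input_sent[j] == input_sent[i]:
--             j += 1
--         if j - i >= 2: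
--             return input_sent[i]
--         i = j
--     return None
-- ===== Notes on version B (the rewrite author's own statement) =====
-- stated objective: alternative
-- what changed: B scans maximal runs of consecutive equal characters (a hand-rolled groupby) and returns the character of the first run of length >= 2, instead of A's sliding pair of adjacent indices compared one step at a time.
import Mathlib
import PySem

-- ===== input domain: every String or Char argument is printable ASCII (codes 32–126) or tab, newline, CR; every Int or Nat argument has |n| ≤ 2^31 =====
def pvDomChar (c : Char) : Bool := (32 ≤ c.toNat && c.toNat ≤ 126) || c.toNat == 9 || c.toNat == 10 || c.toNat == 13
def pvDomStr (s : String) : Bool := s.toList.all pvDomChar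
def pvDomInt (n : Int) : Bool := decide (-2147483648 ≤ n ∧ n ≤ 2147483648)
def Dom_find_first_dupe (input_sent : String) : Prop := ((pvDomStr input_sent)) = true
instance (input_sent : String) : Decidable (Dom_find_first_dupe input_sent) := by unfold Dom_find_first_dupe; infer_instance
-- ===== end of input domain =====

-- B replaces A's sliding pair of adjacent indices by a scan over maximal runs of
-- equal characters (hand-rolled groupby), returning the first run's character when
-- that run has length ≥ 2; same O(n) cost, alternative structure.

-- ===== PORT A =====
-- A's while loop over the index pair (let1, let2); the fuel argument is only a
-- totality guard (cs.length iterations always suffice, the loop advances let2 by 1).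
-- Both reads are in range in Python (let1 = let2-1 < let2 < length), so getD is exact.
def find_first_dupe_loopA (cs : List Char) (let1 let2 : Nat) : Nat → Option String
  | 0 => none
  | fuel + 1 =>
    if let2 < cs.length then
      if cs.getD let1 ' ' = cs.getD let2 ' ' then some (String.ofList [cs.getD let1 ' '])
      else find_first_dupe_loopA cs (let1 + 1) (let2 + 1) fuel
    else none

def find_first_dupe (input_sent : String) : Option String :=
  find_first_dupe_loopA input_sent.toList 0 1 input_sent.toList.length

-- ===== PORT B =====
-- inner while loop of Source B: advance j while j < n and cs[j] == c (fuel = totality guard;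
-- cs.length - j iterations suffice since j grows towards cs.length)
def find_first_dupe_runEnd (cs : List Char) (c : Char) (j : Nat) : Nat → Nat
  | 0 => j
  | fuel + 1 =>
    if j < cs.length ∧ cs.getD j ' ' = c then find_first_dupe_runEnd cs c (j + 1) fuel
    else j

-- outer while loop of Source B (fuel = totality guard; i strictly increases each iteration)
def find_first_dupe_loopB (cs : List Char) (i : Nat) : Nat → Option String
  | 0 => none
  | fuel + 1 =>
    if i < cs.length then
      let j := find_first_dupe_runEnd cs (cs.getD i ' ') i (cs.length - i)
      if j - i ≥ 2 then some (String.ofList [cs.getD i ' '])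
      else find_first_dupe_loopB cs j fuel
    else none

def find_first_dupe_alt (input_sent : String) : Option String :=
  find_first_dupe_loopB input_sent.toList 0 input_sent.toList.length

-- ===== PRECONDITION & SPEC =====
def Spec_find_first_dupe (input_sent : String) (out : Option String) : Prop := out = find_first_dupe_alt input_sent
instance (input_sent : String) (out : Option String) : Decidable (Spec_find_first_dupe input_sent out) := by unfold Spec_find_first_dupe; infer_instance

-- ===== CLAIM (what is proved, stated in full; the proofs are below) =====
def Claim_equal_find_first_dupe : Prop := ∀ (input_sent : String), Dom_find_first_dupe input_sent → Spec_find_first_dupe input_sent (find_first_dupe input_sent)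

-- ===== LEMMAS AND PROOFS =====

-- common reference: first adjacent duplicate of a char list
def pvAdjSpec : List Char → Option String
  | a :: b :: t => if a = b then some (String.ofList [a]) else pvAdjSpec (b :: t)
  | _ => none

theorem pvGetD_lt (cs : List Char) (i : Nat) (h : i < cs.length) :
    cs.getD i ' ' = cs[i] := List.getD_eq_getElem cs ' ' h

theorem pvDrop_cons (cs : List Char) (i : Nat) (h : i < cs.length) :
    cs.drop i = cs[i] :: cs.drop (i + 1) := List.drop_eq_getElem_cons h

theorem pvLoopA_eq (cs : List Char) (k : Nat) :
    ∀ i, cs.length - i ≤ k → find_first_dupe_loopA cs i (i + 1) k = pvAdjSpec (cs.drop i) := by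
  induction k with
  | zero =>
    intro i hk
    rw [find_first_dupe_loopA, List.drop_eq_nil_of_le (by omega)]
    rfl
  | succ k ih =>
    intro i hk
    rw [find_first_dupe_loopA]
    by_cases h : i + 1 < cs.length
    · have hi : i < cs.length := by omega
      rw [if_pos h, pvDrop_cons cs i hi, pvDrop_cons cs (i + 1) h]
      simp only [pvGetD_lt cs i hi, pvGetD_lt cs (i + 1) h]
      conv_rhs => rw [pvAdjSpec]
      by_cases heq : cs[i] = cs[i + 1]
      · rw [if_pos heq, if_pos heq]
      · rw [if_neg heq, if_neg heq, ih (i + 1) (by omega), pvDrop_cons cs (i + 1) h]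
    · rw [if_neg h]
      rcases Nat.lt_or_ge i cs.length with hi | hi
      · rw [pvDrop_cons cs i hi, List.drop_eq_nil_of_le (by omega : cs.length ≤ i + 1)]; rfl
      · rw [List.drop_eq_nil_of_le hi]; rfl

theorem pvRunEnd_ge (cs : List Char) (c : Char) (f : Nat) :
    ∀ j, j ≤ find_first_dupe_runEnd cs c j f := by
  induction f with
  | zero => intro j; rw [find_first_dupe_runEnd]
  | succ f ih =>
    intro j
    rw [find_first_dupe_runEnd]
    by_cases h : j < cs.length ∧ cs.getD j ' ' = c
    · rw [if_pos h]; have := ih (j + 1); omega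
    · rw [if_neg h]

theorem pvRunEnd_stop (cs : List Char) (c : Char) (j f : Nat)
    (h : ¬ (j < cs.length ∧ cs.getD j ' ' = c)) :
    find_first_dupe_runEnd cs c j f = j := by
  cases f with
  | zero => rw [find_first_dupe_runEnd]
  | succ f => rw [find_first_dupe_runEnd, if_neg h]

theorem pvRunEnd_step (cs : List Char) (c : Char) (j f : Nat)
    (h : j < cs.length ∧ cs.getD j ' ' = c) :
    find_first_dupe_runEnd cs c j (f + 1) = find_first_dupe_runEnd cs c (j + 1) f := by
  rw [find_first_dupe_runEnd, if_pos h]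

theorem pvLoopB_eq (cs : List Char) (k : Nat) :
    ∀ i, cs.length - i ≤ k → find_first_dupe_loopB cs i k = pvAdjSpec (cs.drop i) := by
  induction k with
  | zero =>
    intro i hk
    rw [find_first_dupe_loopB, List.drop_eq_nil_of_le (by omega)]
    rfl
  | succ k ih =>
    intro i hk
    rw [find_first_dupe_loopB]
    by_cases hi : i < cs.length
    · rw [if_pos hi]
      obtain ⟨m, hm⟩ : ∃ m, cs.length - i = m + 1 := ⟨cs.length - i - 1, by omega⟩
      have hstep : find_first_dupe_runEnd cs (cs.getD i ' ') i (cs.length - i)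
          = find_first_dupe_runEnd cs (cs.getD i ' ') (i + 1) m := by
        rw [hm, pvRunEnd_step cs (cs.getD i ' ') i m ⟨hi, rfl⟩]
      by_cases hnext : i + 1 < cs.length ∧ cs.getD (i + 1) ' ' = cs.getD i ' '
      · -- run extends past i+1: its length is ≥ 2, the adjacent spec finds the dupe at i
        obtain ⟨m2, hm2⟩ : ∃ m2, m = m2 + 1 := ⟨m - 1, by omega⟩
        have hstep2 : find_first_dupe_runEnd cs (cs.getD i ' ') (i + 1) m
            = find_first_dupe_runEnd cs (cs.getD i ' ') (i + 1 + 1) m2 := by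
          rw [hm2, pvRunEnd_step cs (cs.getD i ' ') (i + 1) m2 hnext]
        have hge2 := pvRunEnd_ge cs (cs.getD i ' ') m2 (i + 1 + 1)
        have hcond : find_first_dupe_runEnd cs (cs.getD i ' ') i (cs.length - i) - i ≥ 2 := by
          omega
        rw [if_pos hcond, pvDrop_cons cs i hi, pvDrop_cons cs (i + 1) hnext.1]
        simp only [pvGetD_lt cs i hi]
        have hab : cs[i] = cs[i + 1] := by
          have h2 := hnext.2
          rw [pvGetD_lt cs (i + 1) hnext.1] at h2
          exact (h2.trans (pvGetD_lt cs i hi)).symm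
        conv_rhs => rw [pvAdjSpec]
        rw [if_pos hab]
      · -- run stops at i+1: recurse there, matching the spec's step
        have hstop := pvRunEnd_stop cs (cs.getD i ' ') (i + 1) m hnext
        have hj : find_first_dupe_runEnd cs (cs.getD i ' ') i (cs.length - i) = i + 1 := by
          omega
        rw [hj, if_neg (by omega : ¬ (i + 1 - i ≥ 2)), ih (i + 1) (by omega),
          pvDrop_cons cs i hi]
        by_cases h1 : i + 1 < cs.length
        · have hab : cs[i] ≠ cs[i + 1] := by
            intro hab
            exact hnext ⟨h1, by rw [pvGetD_lt cs (i + 1) h1, pvGetD_lt cs i hi, hab]⟩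
          rw [pvDrop_cons cs (i + 1) h1]
          conv_rhs => rw [pvAdjSpec]
          rw [if_neg hab]
        · rw [List.drop_eq_nil_of_le (show cs.length ≤ i + 1 by omega)]; rfl
    · rw [if_neg hi, List.drop_eq_nil_of_le (by omega)]; rfl

-- ===== VERDICT (by name: the statement is the Claim_ definition above) =====
theorem find_first_dupe_spec : Claim_equal_find_first_dupe := by
  intro s _
  unfold Spec_find_first_dupe find_first_dupe find_first_dupe_alt
  rw [pvLoopB_eq s.toList (s.toList.length) 0 (by omega),
      pvLoopA_eq s.toList (s.toList.length) 0 (by omega)]
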